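-- pv_equiv track=rewrite | github.com/MickaelMasson/ca_feu | feu04.py | get_string_from_list
-- ===== SOURCE A (Python) =====
-- def get_string_from_list(plate_list: list[tuple[int, int, str]]) -> str:
--
--     plate_str = ""
--     line_index = 0
--
--     for i in plate_list:
--         if i[1] != line_index:
--             plate_str += "\n"
--             line_index = i[1]
--         plate_str += str(i[2])
--
--     return plate_str
-- ===== SOURCE B (Python) =====
-- def get_string_from_list(plate_list):
--     # Group the list into maximal runs of equal line number, then join parts.
--     parts = []
--     prev = 0
--     i, n = 0, len(plate_list)
--     while i < n:
--         key = plate_list[i][1]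
--         j = i
--         while j < n and plate_list[j][1] == key:
--             j += 1
--         if key != prev:
--             parts.append("\n")
--             prev = key
--         parts.append("".join(str(t[2]) for t in plate_list[i:j]))
--         i = j
--     return "".join(parts)
-- ===== Notes on version B (the rewrite author's own statement) =====
-- stated objective: alternative
-- what changed: Replaces the flat per-element transition loop with string concatenation by a run-detection pass: consecutive runs of equal line number are located with a nested scan, each run's strings are joined in one go, and the result is a single join over a parts list.
import Mathlib
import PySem

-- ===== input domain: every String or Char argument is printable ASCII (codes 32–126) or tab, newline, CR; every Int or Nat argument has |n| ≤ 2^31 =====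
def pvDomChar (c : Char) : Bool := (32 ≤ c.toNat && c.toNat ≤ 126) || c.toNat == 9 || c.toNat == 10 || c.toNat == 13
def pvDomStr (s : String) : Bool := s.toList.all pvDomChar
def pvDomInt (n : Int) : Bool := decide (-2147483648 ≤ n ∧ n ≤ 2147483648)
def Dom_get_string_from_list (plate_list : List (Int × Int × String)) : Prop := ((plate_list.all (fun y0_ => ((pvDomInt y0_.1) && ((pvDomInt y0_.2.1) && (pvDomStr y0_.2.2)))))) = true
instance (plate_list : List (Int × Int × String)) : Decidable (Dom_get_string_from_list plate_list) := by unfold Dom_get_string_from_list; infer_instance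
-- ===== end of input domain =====

-- B groups the list into maximal runs of equal line number and joins parts; A walks elements one by one, appending to one string.
-- ===== PORT A =====
-- one step of A's for loop: add "\n" on a line change (updating line_index), then append the string
def pvAStep (st : String × Int) (i : Int × Int × String) : String × Int :=
  let st' := if i.2.1 ≠ st.2 then (st.1 ++ "\n", i.2.1) else st
  (st'.1 ++ i.2.2, st'.2)

def get_string_from_list (plate_list : List (Int × Int × String)) : String :=
  (plate_list.foldl pvAStep ("", 0)).1

-- ===== PORT B =====
-- inner while loop of B: split off the maximal run with line number k (run, remainder)
def pvTakeRun (k : Int) : List (Int × Int × String) → List (Int × Int × String) × List (Int × Int × String)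
  | [] => ([], [])
  | x :: xs =>
    if x.2.1 = k then
      let p := pvTakeRun k xs
      (x :: p.1, p.2)
    else ([], x :: xs)

theorem pvTakeRun_len (k : Int) (l : List (Int × Int × String)) :
    (pvTakeRun k l).2.length ≤ l.length := by
  induction l with
  | nil => simp [pvTakeRun]
  | cons x xs ih =>
    simp only [pvTakeRun]
    split
    · exact Nat.le_succ_of_le ih
    · simp

-- outer while loop of B: the list of (line number, run) groups
def pvGroups : List (Int × Int × String) → List (Int × List (Int × Int × String))
  | [] => []
  | x :: xs =>
    (x.2.1, x :: (pvTakeRun x.2.1 xs).1) :: pvGroups (pvTakeRun x.2.1 xs).2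
  termination_by l => l.length
  decreasing_by
    exact Nat.lt_succ_of_le (pvTakeRun_len x.2.1 xs)

-- per-group body of B's outer loop: maybe append "\n" (updating prev), then append the joined run
def pvBStep (st : List String × Int) (g : Int × List (Int × Int × String)) : List String × Int :=
  let st' := if g.1 ≠ st.2 then (st.1 ++ ["\n"], g.1) else st
  (st'.1 ++ [String.join (g.2.map (fun t => t.2.2))], st'.2)

def get_string_from_list_alt (plate_list : List (Int × Int × String)) : String :=
  String.join ((pvGroups plate_list).foldl pvBStep ([], 0)).1

-- ===== PRECONDITION & SPEC =====
def Spec_get_string_from_list (plate_list : List (Int × Int × String)) (out : String) : Prop := out = get_string_from_list_alt plate_list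
instance (plate_list : List (Int × Int × String)) (out : String) : Decidable (Spec_get_string_from_list plate_list out) := by unfold Spec_get_string_from_list; infer_instance

-- ===== CLAIM (what is proved, stated in full; the proofs are below) =====
def Claim_equal_get_string_from_list : Prop := ∀ (plate_list : List (Int × Int × String)), Dom_get_string_from_list plate_list → Spec_get_string_from_list plate_list (get_string_from_list plate_list)

-- ===== LEMMAS AND PROOFS =====

theorem pvFoldlAppend_shift : ∀ (l : List String) (s : String),
    l.foldl (fun r t => r ++ t) s = s ++ l.foldl (fun r t => r ++ t) "" := by
  intro l
  induction l with
  | nil => intro s; simp [String.append_empty]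
  | cons a l ih =>
    intro s
    rw [List.foldl_cons, List.foldl_cons, ih (s ++ a), ih ("" ++ a),
      String.empty_append, String.append_assoc]

theorem pvJoin_cons (a : String) (l : List String) : String.join (a :: l) = a ++ String.join l := by
  simp only [String.join, List.foldl_cons]
  rw [pvFoldlAppend_shift, String.empty_append]

theorem pvJoin_append (l m : List String) : String.join (l ++ m) = String.join l ++ String.join m := by
  induction l with
  | nil => simp [String.join, String.empty_append]
  | cons a l ih => rw [List.cons_append, pvJoin_cons, pvJoin_cons, ih, String.append_assoc]

theorem pvAStep_eq (s : String) (k : Int) (x : Int × Int × String) (h : x.2.1 = k) :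
    pvAStep (s, k) x = (s ++ x.2.2, k) := by simp [pvAStep, h]

theorem pvAStep_ne (s : String) (k : Int) (x : Int × Int × String) (h : x.2.1 ≠ k) :
    pvAStep (s, k) x = (s ++ "\n" ++ x.2.2, x.2.1) := by simp [pvAStep, h]

theorem pvBStep_eq (ps : List String) (k : Int) (g : Int × List (Int × Int × String)) (h : g.1 = k) :
    pvBStep (ps, k) g = (ps ++ [String.join (g.2.map (fun t => t.2.2))], k) := by
  simp [pvBStep, h]

theorem pvBStep_ne (ps : List String) (k : Int) (g : Int × List (Int × Int × String)) (h : g.1 ≠ k) :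
    pvBStep (ps, k) g = (ps ++ ["\n"] ++ [String.join (g.2.map (fun t => t.2.2))], g.1) := by
  simp [pvBStep, h, List.append_assoc]

-- A's loop over a maximal k-run appends exactly the run's strings, leaving line_index at k
theorem pvAStep_run (l : List (Int × Int × String)) : ∀ (s : String) (k : Int),
    l.foldl pvAStep (s, k) =
      (pvTakeRun k l).2.foldl pvAStep (s ++ String.join ((pvTakeRun k l).1.map (fun t => t.2.2)), k) := by
  induction l with
  | nil => intro s k; simp [pvTakeRun, String.join, String.append_empty]
  | cons x xs ih =>
    intro s k
    by_cases h : x.2.1 = k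
    · simp only [pvTakeRun, if_pos h, List.foldl_cons, pvAStep_eq s k x h]
      rw [ih (s ++ x.2.2) k]
      simp [pvJoin_cons, pvJoin_append, String.append_assoc, String.append_empty, String.empty_append]
    · simp [pvTakeRun, h, String.join, String.append_empty]

-- B's fold is insensitive to a parts prefix
theorem pvBStep_shift (gs : List (Int × List (Int × Int × String))) :
    ∀ (ps : List String) (k : Int),
    gs.foldl pvBStep (ps, k) =
      (ps ++ (gs.foldl pvBStep ([], k)).1, (gs.foldl pvBStep ([], k)).2) := by
  induction gs with
  | nil => intro ps k; simp
  | cons g gs ih =>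
    intro ps k
    by_cases h : g.1 = k
    · rw [List.foldl_cons, List.foldl_cons, pvBStep_eq ps k g h, pvBStep_eq [] k g h,
        ih (ps ++ [String.join (g.2.map (fun t => t.2.2))]) k,
        ih ([] ++ [String.join (g.2.map (fun t => t.2.2))]) k]
      simp [List.append_assoc]
    · rw [List.foldl_cons, List.foldl_cons, pvBStep_ne ps k g h, pvBStep_ne [] k g h,
        ih (ps ++ ["\n"] ++ [String.join (g.2.map (fun t => t.2.2))]) g.1,
        ih ([] ++ ["\n"] ++ [String.join (g.2.map (fun t => t.2.2))]) g.1]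
      simp [List.append_assoc]

-- equations of pvGroups (it is defined by well-founded recursion)
theorem pvGroups_nil : pvGroups [] = [] := by rw [pvGroups]

theorem pvGroups_cons (x : Int × Int × String) (xs : List (Int × Int × String)) :
    pvGroups (x :: xs) =
      (x.2.1, x :: (pvTakeRun x.2.1 xs).1) :: pvGroups (pvTakeRun x.2.1 xs).2 := by
  rw [pvGroups]

-- main invariant: from any state (s, k), A's remaining loop equals s ++ B's joined parts over the groups
theorem pvMain : ∀ (n : ℕ) (l : List (Int × Int × String)), l.length ≤ n → ∀ (s : String) (k : Int),
    (l.foldl pvAStep (s, k)).1 = s ++ String.join ((pvGroups l).foldl pvBStep ([], k)).1 := by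
  intro n
  induction n with
  | zero =>
    intro l hl s k
    have : l = [] := List.eq_nil_of_length_eq_zero (Nat.le_zero.mp hl)
    subst this
    simp [pvGroups_nil, String.join, String.append_empty]
  | succ n ih =>
    intro l hl s k
    cases l with
    | nil => simp [pvGroups_nil, String.join, String.append_empty]
    | cons x xs =>
      have hrest : (pvTakeRun x.2.1 xs).2.length ≤ n :=
        le_trans (pvTakeRun_len x.2.1 xs) (Nat.succ_le_succ_iff.mp hl)
      by_cases h : x.2.1 = k
      · -- no line change: x continues the current run
        subst h
        rw [pvAStep_run (x :: xs) s x.2.1]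
        simp only [pvTakeRun, eq_self_iff_true, if_true]
        rw [ih _ hrest, pvGroups_cons, List.foldl_cons, pvBStep_eq [] x.2.1 _ rfl,
          pvBStep_shift _ ([] ++ [String.join ((x :: (pvTakeRun x.2.1 xs).1).map (fun t => t.2.2))]) x.2.1]
        simp [pvJoin_cons, pvJoin_append, String.append_assoc, String.append_empty, String.empty_append]
      · -- line change: newline on both sides, then recurse with prev = x.2.1
        rw [List.foldl_cons, pvAStep_ne s k x h, pvAStep_run xs (s ++ "\n" ++ x.2.2) x.2.1,
          ih _ hrest, pvGroups_cons, List.foldl_cons, pvBStep_ne [] k _ h,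
          pvBStep_shift _ ([] ++ ["\n"] ++ [String.join ((x :: (pvTakeRun x.2.1 xs).1).map (fun t => t.2.2))]) x.2.1]
        simp [pvJoin_cons, pvJoin_append, String.append_assoc, String.append_empty, String.empty_append]

-- ===== VERDICT (by name: the statement is the Claim_ definition above) =====
theorem get_string_from_list_spec : Claim_equal_get_string_from_list := by
  intro plate_list _
  unfold Spec_get_string_from_list get_string_from_list get_string_from_list_alt
  have := pvMain plate_list.length plate_list le_rfl "" 0
  simpa using this
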